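-- pv_equiv track=rewrite | github.com/moolean/algoland | scripts/lesson_viewer.py | nearest_prev_heading
-- ===== SOURCE A (Python) =====
-- def nearest_prev_heading(headings, scroll):
--     prev = 0
--     for pos in headings:
--         if pos < scroll:
--             prev = pos
--         else:
--             break
--     return prev
-- ===== SOURCE B (Python) =====
-- def nearest_prev_heading(headings, scroll):
--     # Divide and conquer: for a segment return (last element of its leading
--     # "< scroll" prefix or None, whether ALL its elements are < scroll).
--     # Combine: if the left half is not all < scroll the prefix ends there;
--     # otherwise the right half's prefix continues it.
--     def solve(lo, hi):
--         if hi - lo == 1: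
--             p = headings[lo]
--             return (p, True) if p < scroll else (None, False)
--         mid = (lo + hi) // 2
--         pl, cl = solve(lo, mid)
--         pr, cr = solve(mid, hi)
--         if not cl:
--             return (pl, False)
--         return (pr if pr is not None else pl, cr)
--     if not headings:
--         return 0
--     p, _ = solve(0, len(headings))
--     return p if p is not None else 0
-- ===== Notes on version B (the rewrite author's own statement) =====
-- stated objective: alternative
-- what changed: Replaces A's left-to-right accumulator scan with early break by a divide-and-conquer over halves that combines per-segment summaries (last element of the leading '< scroll' prefix, and an all-below flag).
import Mathlib
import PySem

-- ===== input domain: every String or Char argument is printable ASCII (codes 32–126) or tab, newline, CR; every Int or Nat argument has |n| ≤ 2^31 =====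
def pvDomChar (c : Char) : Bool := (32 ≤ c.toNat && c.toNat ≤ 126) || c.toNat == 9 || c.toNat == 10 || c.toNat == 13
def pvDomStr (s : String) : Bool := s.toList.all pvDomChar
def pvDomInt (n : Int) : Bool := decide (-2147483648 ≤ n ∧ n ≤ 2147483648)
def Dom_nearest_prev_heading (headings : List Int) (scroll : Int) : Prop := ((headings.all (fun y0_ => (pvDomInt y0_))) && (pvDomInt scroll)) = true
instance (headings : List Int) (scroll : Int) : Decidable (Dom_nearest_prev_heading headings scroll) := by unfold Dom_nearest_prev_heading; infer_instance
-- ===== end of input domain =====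

-- B replaces A's accumulator scan with early break by a divide-and-conquer over
-- halves combining (last of the leading '< scroll' prefix, all-below flag);
-- objective: alternative (same O(n) cost, different algorithm).

-- ===== PORT A =====
-- the for-loop with early break, prev as accumulator
def nearestPrevLoop (scroll : Int) (prev : Int) : List Int → Int
  | [] => prev
  | pos :: rest => if pos < scroll then nearestPrevLoop scroll pos rest else prev

def nearest_prev_heading (headings : List Int) (scroll : Int) : Int :=
  nearestPrevLoop scroll 0 headings

-- ===== PORT B =====
-- solve(lo, hi) of Source B; Python only ever calls it with hi - lo ≥ 1, the final
-- else branch is a totality guard for the unreachable hi - lo = 0 case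
def solveDC (headings : List Int) (scroll : Int) (lo hi : Nat) : Option Int × Bool :=
  if hi - lo = 1 then
    -- headings[lo]: always in range here (lo < hi ≤ len), so getD 0 is unreachable
    let p := (PySem.List.pyGet? headings (lo : Int)).getD 0
    if p < scroll then (some p, true) else (none, false)
  else if _h : 2 ≤ hi - lo then
    let mid := (lo + hi) / 2
    let l := solveDC headings scroll lo mid
    let r := solveDC headings scroll mid hi
    if !l.2 then (l.1, false)
    else ((match r.1 with | some _ => r.1 | none => l.1), r.2)
  else (none, true)
termination_by hi - lo
decreasing_by all_goals omega

def nearest_prev_heading_alt (headings : List Int) (scroll : Int) : Int :=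
  if headings = [] then 0
  else
    match (solveDC headings scroll 0 headings.length).1 with
    | some p => p
    | none => 0

-- ===== PRECONDITION & SPEC =====
def Spec_nearest_prev_heading (headings : List Int) (scroll : Int) (out : Int) : Prop := out = nearest_prev_heading_alt headings scroll
instance (headings : List Int) (scroll : Int) (out : Int) : Decidable (Spec_nearest_prev_heading headings scroll out) := by unfold Spec_nearest_prev_heading; infer_instance

-- ===== CLAIM (what is proved, stated in full; the proofs are below) =====
def Claim_equal_nearest_prev_heading : Prop := ∀ (headings : List Int) (scroll : Int), Dom_nearest_prev_heading headings scroll → Spec_nearest_prev_heading headings scroll (nearest_prev_heading headings scroll)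

-- ===== LEMMAS AND PROOFS =====

-- proof-side list-recursive spec of a segment summary:
-- (last element of the leading '< s' prefix, whether all elements are < s)
def pairSpec (s : Int) : List Int → Option Int × Bool
  | [] => (none, true)
  | a :: l =>
    if a < s then
      ((match (pairSpec s l).1 with | some p => some p | none => some a), (pairSpec s l).2)
    else (none, false)

-- the divide-and-conquer combine is exactly pairSpec's behaviour on append
theorem pairSpec_append (s : Int) (l1 l2 : List Int) :
    pairSpec s (l1 ++ l2) =
      (if !(pairSpec s l1).2 then ((pairSpec s l1).1, false)
       else ((match (pairSpec s l2).1 with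
              | some _ => (pairSpec s l2).1
              | none => (pairSpec s l1).1), (pairSpec s l2).2)) := by
  induction l1 with
  | nil =>
    simp only [List.nil_append, pairSpec]
    cases h : (pairSpec s l2).1 <;> simp [h, Prod.ext_iff]
  | cons a l1 ih =>
    simp only [List.cons_append, pairSpec, ih]
    by_cases h : a < s
    · simp only [if_pos h]
      cases hc : (pairSpec s l1).2 <;>
        cases h1 : (pairSpec s l1).1 <;>
          cases h2 : (pairSpec s l2).1 <;> simp
    · simp [if_neg h]

-- base case of the divide and conquer: a one-element segment
theorem solveDC_base (headings : List Int) (s : Int) (lo hi : Nat)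
    (hbase : hi - lo = 1) (h2 : hi ≤ headings.length) :
    solveDC headings s lo hi = pairSpec s ((headings.drop lo).take (hi - lo)) := by
  have hlo : lo < headings.length := by omega
  rw [solveDC, if_pos hbase, hbase]
  rw [show (headings.drop lo).take 1 = [headings[lo]] from by
        rw [List.drop_eq_getElem_cons hlo]; rfl]
  rw [PySem.List.pyGet?_natCast]
  simp [pairSpec, List.getElem?_eq_getElem hlo]

-- recursive case of the divide and conquer: split the segment at mid
theorem solveDC_rec (headings : List Int) (s : Int) (lo hi : Nat)
    (hbase : ¬ hi - lo = 1) (hge : 2 ≤ hi - lo)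
    (ihl : solveDC headings s lo ((lo + hi) / 2) =
      pairSpec s ((headings.drop lo).take ((lo + hi) / 2 - lo)))
    (ihr : solveDC headings s ((lo + hi) / 2) hi =
      pairSpec s ((headings.drop ((lo + hi) / 2)).take (hi - (lo + hi) / 2))) :
    solveDC headings s lo hi = pairSpec s ((headings.drop lo).take (hi - lo)) := by
  rw [solveDC]
  simp only [if_neg hbase, dif_pos hge]
  rw [ihl, ihr]
  have hsplit : (headings.drop lo).take (hi - lo) =
      (headings.drop lo).take ((lo + hi) / 2 - lo) ++
      (headings.drop ((lo + hi) / 2)).take (hi - (lo + hi) / 2) := by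
    rw [show hi - lo = ((lo + hi) / 2 - lo) + (hi - (lo + hi) / 2) by omega,
        List.take_add, List.drop_drop]
    congr 3
    omega
  rw [hsplit, pairSpec_append]

-- solveDC computes pairSpec of its segment
theorem solveDC_eq (headings : List Int) (s : Int) (lo hi : Nat) :
    lo < hi → hi ≤ headings.length →
    solveDC headings s lo hi = pairSpec s ((headings.drop lo).take (hi - lo)) := by
  induction lo, hi using solveDC.induct headings s with
  | case1 lo hi hbase _hp =>
    exact fun _ h2 => solveDC_base headings s lo hi hbase h2
  | case2 lo hi hbase _hp =>
    exact fun _ h2 => solveDC_base headings s lo hi hbase h2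
  | case3 lo hi hbase hge _mid _l _hc ihl ihr =>
    intro _ h2
    exact solveDC_rec headings s lo hi hbase hge
      (ihl (by omega) (by omega)) (ihr (by omega) h2)
  | case4 lo hi hbase hge _mid _l _hc ihl ihr =>
    intro _ h2
    exact solveDC_rec headings s lo hi hbase hge
      (ihl (by omega) (by omega)) (ihr (by omega) h2)
  | case5 lo hi hbase hge => intro h1 _; omega

-- A's loop computes the first pairSpec component (default prev)
theorem loopA_eq (s : Int) (l : List Int) (prev : Int) :
    nearestPrevLoop s prev l =
      (match (pairSpec s l).1 with | some p => p | none => prev) := by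
  induction l generalizing prev with
  | nil => simp [nearestPrevLoop, pairSpec]
  | cons a l ih =>
    simp only [nearestPrevLoop, pairSpec]
    by_cases h : a < s
    · simp only [if_pos h, ih a]
      cases h1 : (pairSpec s l).1 <;> simp
    · simp [if_neg h]

-- ===== VERDICT (by name: the statement is the Claim_ definition above) =====
theorem nearest_prev_heading_spec : Claim_equal_nearest_prev_heading := by
  intro headings scroll _
  unfold Spec_nearest_prev_heading nearest_prev_heading nearest_prev_heading_alt
  by_cases hnil : headings = []
  · simp [hnil, nearestPrevLoop]
  · rw [if_neg hnil,
        solveDC_eq headings scroll 0 headings.length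
          (by cases headings <;> simp_all) (le_refl _)]
    simp only [List.drop_zero, Nat.sub_zero, List.take_length]
    rw [loopA_eq]
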